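-- pv_equiv track=rewrite | github.com/domdew23/Data-Visualizations | project_files/population_data/world_population.py | group_countries
-- ===== SOURCE A (Python) =====
-- def group_countries(cc_populations):
-- 	# Group countries into 3 population levels
-- 	cc_pops1, cc_pops2, cc_pops3 = {}, {}, {}
-- 	for cc, pop in cc_populations.items():
-- 		if pop < 10000000:
-- 			cc_pops1[cc] = pop
-- 		elif pop < 1000000000:
-- 			cc_pops2[cc] = pop
-- 		else:
-- 			cc_pops3[cc] = pop
-- 	return cc_pops1, cc_pops2, cc_pops3
-- ===== SOURCE B (Python) =====
-- def group_countries(cc_populations):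
--     # Stable-sort items by a computed population level, then split the sorted
--     # list at the two level boundaries: stability keeps each bucket's original order.
--     def level(pop):
--         if pop < 10000000:
--             return 0
--         if pop < 1000000000:
--             return 1
--         return 2
--     items = sorted(cc_populations.items(), key=lambda kv: level(kv[1]))
--     i = 0
--     while i < len(items) and level(items[i][1]) == 0:
--         i += 1
--     j = i
--     while j < len(items) and level(items[j][1]) == 1:
--         j += 1
--     return dict(items[:i]), dict(items[i:j]), dict(items[j:])
-- ===== Notes on version B (the rewrite author's own statement) =====
-- stated objective: alternative
-- what changed: A's single one-pass if/elif/else loop over three mutable dicts is replaced by computing a 3-valued population level per country, stable-sorting the items by that level, and splitting the sorted list at the two level boundaries; stability guarantees each bucket keeps A's insertion order.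
import Mathlib
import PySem

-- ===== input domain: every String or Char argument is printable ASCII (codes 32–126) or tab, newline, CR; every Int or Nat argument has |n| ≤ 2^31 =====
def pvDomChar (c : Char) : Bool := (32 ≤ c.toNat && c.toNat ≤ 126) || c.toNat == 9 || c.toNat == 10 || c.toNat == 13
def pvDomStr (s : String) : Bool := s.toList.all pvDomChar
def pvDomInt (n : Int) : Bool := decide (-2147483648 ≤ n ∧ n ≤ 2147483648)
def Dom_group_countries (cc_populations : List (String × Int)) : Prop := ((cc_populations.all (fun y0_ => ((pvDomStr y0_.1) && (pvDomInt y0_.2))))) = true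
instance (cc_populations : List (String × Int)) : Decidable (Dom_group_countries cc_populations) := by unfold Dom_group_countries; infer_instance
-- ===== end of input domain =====

-- B replaces A's one-pass three-way branching loop by a stable sort on a computed
-- population level followed by splitting the sorted list at the two level boundaries
-- (objective: alternative algorithm, same asymptotic cost up to the sort).

-- ===== PORT A =====
def group_countries (cc_populations : List (String × Int)) : (List (String × Int)) × (List (String × Int)) × (List (String × Int)) :=
  let r := cc_populations.foldl
    (fun (st : PySem.Dict String Int × PySem.Dict String Int × PySem.Dict String Int) p =>
      if p.2 < 10000000 then (st.1.insert p.1 p.2, st.2.1, st.2.2)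
      else if p.2 < 1000000000 then (st.1, st.2.1.insert p.1 p.2, st.2.2)
      else (st.1, st.2.1, st.2.2.insert p.1 p.2))
    (PySem.Dict.empty, PySem.Dict.empty, PySem.Dict.empty)
  (r.1.items, r.2.1.items, r.2.2.items)

-- ===== PORT B =====
-- helper 'level' of Source B
def pvLevel (pop : Int) : Int :=
  if pop < 10000000 then 0 else if pop < 1000000000 then 1 else 2

-- the 'while i < len(items) and level(items[i][1]) == lv: i += 1' scan of Source B,
-- as structural recursion counting the qualifying prefix
def pvScan (items : List (String × Int)) (lv : Int) : Nat :=
  match items with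
  | [] => 0
  | kv :: t => if pvLevel kv.2 == lv then pvScan t lv + 1 else 0

def group_countries_alt (cc_populations : List (String × Int)) : (List (String × Int)) × (List (String × Int)) × (List (String × Int)) :=
  let items := PySem.List.sorted cc_populations (fun kv => pvLevel kv.2)
  let i := pvScan items 0
  let j := i + pvScan (items.drop i) 1
  ((PySem.Dict.ofList (PySem.List.slice items none (some (i : Int)))).items,
   (PySem.Dict.ofList (PySem.List.slice items (some (i : Int)) (some (j : Int)))).items,
   (PySem.Dict.ofList (PySem.List.slice items (some (j : Int)) none)).items)

-- ===== PRECONDITION & SPEC =====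
-- Pre_ requires distinct keys: the Python argument is a dict (whose keys are necessarily
-- unique), so lists with duplicate keys are not valid encodings of any input of A.
def Pre_group_countries (cc_populations : List (String × Int)) : Prop :=
  (cc_populations.map Prod.fst).Nodup
instance (cc_populations : List (String × Int)) : Decidable (Pre_group_countries cc_populations) := by unfold Pre_group_countries; infer_instance
def pvWitness_group_countries : (List (String × Int)) := [("China", 1400000000), ("Iceland", 350000), ("France", 67000000)]
def Spec_group_countries (cc_populations : List (String × Int)) (out : (List (String × Int)) × (List (String × Int)) × (List (String × Int))) : Prop := out = group_countries_alt cc_populations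
instance (cc_populations : List (String × Int)) (out : (List (String × Int)) × (List (String × Int)) × (List (String × Int))) : Decidable (Spec_group_countries cc_populations out) := by unfold Spec_group_countries; infer_instance

-- ===== CLAIM (what is proved, stated in full; the proofs are below) =====
def Claim_equal_group_countries : Prop := ∀ (cc_populations : List (String × Int)), Dom_group_countries cc_populations → Pre_group_countries cc_populations → Spec_group_countries cc_populations (group_countries cc_populations)

-- ===== LEMMAS AND PROOFS =====

-- insertBy inserts after a block it does not go before, in front of a block it does
theorem insertBy_split {α : Type} (before : α → α → Bool) (x : α) (A B : List α)
    (hA : ∀ a ∈ A, before x a = false) (hB : ∀ b ∈ B, before x b = true) :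
    PySem.List.insertBy before x (A ++ B) = A ++ x :: B := by
  induction A with
  | nil =>
    cases B with
    | nil => simp [PySem.List.insertBy]
    | cons b t => simp [PySem.List.insertBy, hB b (List.mem_cons_self)]
  | cons a t ih =>
    simp only [List.cons_append, PySem.List.insertBy,
      hA a (List.mem_cons_self)]
    simp [ih (fun a ha => hA a (List.mem_cons_of_mem _ ha))]

-- invariant of insertion sort with the 3-valued level key: the accumulator stays
-- (level-0 block) ++ (level-1 block) ++ (level-2 block), each in arrival order
theorem foldl_insertBy_level (l : List (String × Int)) (A B C : List (String × Int))
    (hA : ∀ x ∈ A, pvLevel x.2 = 0) (hB : ∀ x ∈ B, pvLevel x.2 = 1) (hC : ∀ x ∈ C, pvLevel x.2 = 2) :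
    l.foldl (fun acc x => PySem.List.insertBy (fun a b => decide (pvLevel a.2 < pvLevel b.2)) x acc) (A ++ B ++ C)
    = (A ++ l.filter (fun p => pvLevel p.2 == 0)) ++ (B ++ l.filter (fun p => pvLevel p.2 == 1))
      ++ (C ++ l.filter (fun p => pvLevel p.2 == 2)) := by
  induction l generalizing A B C with
  | nil => simp
  | cons x t ih =>
    have hlv : pvLevel x.2 = 0 ∨ pvLevel x.2 = 1 ∨ pvLevel x.2 = 2 := by
      unfold pvLevel; split_ifs <;> simp
    simp only [List.foldl_cons, List.filter_cons]
    rcases hlv with h0 | h1 | h2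
    · rw [List.append_assoc A B C,
        insertBy_split _ x A (B ++ C)
          (fun a ha => by simp [h0, hA a ha])
          (fun b hb => by
            rcases List.mem_append.mp hb with hb | hb
            · simp [h0, hB b hb]
            · simp [h0, hC b hb]),
        show A ++ x :: (B ++ C) = (A ++ [x]) ++ B ++ C by simp,
        ih (A ++ [x]) B C
          (fun a ha => by rcases List.mem_append.mp ha with ha | ha
                          · exact hA a ha
                          · simp at ha; subst ha; exact h0)
          hB hC]
      simp [h0]
    · rw [show A ++ B ++ C = (A ++ B) ++ C by simp,
        insertBy_split _ x (A ++ B) C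
          (fun a ha => by
            rcases List.mem_append.mp ha with ha | ha
            · simp [h1, hA a ha]
            · simp [h1, hB a ha])
          (fun b hb => by simp [h1, hC b hb]),
        show (A ++ B) ++ x :: C = A ++ (B ++ [x]) ++ C by simp,
        ih A (B ++ [x]) C hA
          (fun a ha => by rcases List.mem_append.mp ha with ha | ha
                          · exact hB a ha
                          · simp at ha; subst ha; exact h1)
          hC]
      simp [h1]
    · rw [show A ++ B ++ C = (A ++ B ++ C) ++ [] by simp,
        insertBy_split _ x (A ++ B ++ C) []
          (fun a ha => by
            rcases List.mem_append.mp ha with ha | ha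
            · rcases List.mem_append.mp ha with ha | ha
              · simp [h2, hA a ha]
              · simp [h2, hB a ha]
            · simp [h2, hC a ha])
          (fun b hb => by simp at hb),
        show (A ++ B ++ C) ++ x :: [] = A ++ B ++ (C ++ [x]) by simp,
        ih A B (C ++ [x]) hA hB
          (fun a ha => by rcases List.mem_append.mp ha with ha | ha
                          · exact hC a ha
                          · simp at ha; subst ha; exact h2)]
      simp [h2]

-- the stable sort by level is exactly the three level blocks in original order
theorem sorted_level_eq (l : List (String × Int)) :
    PySem.List.sorted l (fun kv => pvLevel kv.2)
    = l.filter (fun p => pvLevel p.2 == 0) ++ l.filter (fun p => pvLevel p.2 == 1)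
      ++ l.filter (fun p => pvLevel p.2 == 2) := by
  rw [PySem.List.sorted_eq_foldl_insertBy]
  have := foldl_insertBy_level l [] [] [] (by simp) (by simp) (by simp)
  simpa using this

theorem pvScan_append (A B : List (String × Int)) (lv : Int)
    (hA : ∀ x ∈ A, pvLevel x.2 = lv) (hB : ∀ x ∈ B, pvLevel x.2 ≠ lv) :
    pvScan (A ++ B) lv = A.length := by
  induction A with
  | nil =>
    cases B with
    | nil => rfl
    | cons b t => simp [pvScan, hB b (List.mem_cons_self)]
  | cons a t ih =>
    simp [pvScan, hA a (List.mem_cons_self), ih (fun x hx => hA x (List.mem_cons_of_mem _ hx))]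

-- dict(pairs) on fresh, pairwise-distinct keys appends them in order
theorem foldl_insert_items (l : List (String × Int)) (d : PySem.Dict String Int)
    (hnd : (l.map Prod.fst).Nodup) (hd : ∀ p ∈ l, d.contains p.1 = false) :
    (l.foldl (fun acc p => acc.insert p.1 p.2) d).items = d.items ++ l := by
  induction l generalizing d with
  | nil => simp
  | cons p t ih =>
    simp only [List.map_cons, List.nodup_cons, List.mem_map] at hnd
    simp only [List.foldl_cons]
    rw [ih _ hnd.2 (fun q hq => by
      rw [PySem.Dict.contains_insert]
      have hne : q.1 ≠ p.1 := fun h => hnd.1 ⟨q, hq, h⟩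
      simp [hne, hd q (List.mem_cons_of_mem _ hq)])]
    simp [PySem.Dict.items_insert, hd p (List.mem_cons_self)]

theorem ofList_items (l : List (String × Int)) (hnd : (l.map Prod.fst).Nodup) :
    (PySem.Dict.ofList l).items = l := by
  have := foldl_insert_items l PySem.Dict.empty hnd
    (fun p _ => PySem.Dict.contains_empty p.1)
  simpa [PySem.Dict.ofList, PySem.Dict.update] using this

-- A's loop produces exactly the three level filters
theorem group_countries_loop_eq (l : List (String × Int))
    (d1 d2 d3 : PySem.Dict String Int)
    (hnd : (l.map Prod.fst).Nodup)
    (h1 : ∀ p ∈ l, d1.contains p.1 = false)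
    (h2 : ∀ p ∈ l, d2.contains p.1 = false)
    (h3 : ∀ p ∈ l, d3.contains p.1 = false) :
    l.foldl
      (fun (st : PySem.Dict String Int × PySem.Dict String Int × PySem.Dict String Int) p =>
        if p.2 < 10000000 then (st.1.insert p.1 p.2, st.2.1, st.2.2)
        else if p.2 < 1000000000 then (st.1, st.2.1.insert p.1 p.2, st.2.2)
        else (st.1, st.2.1, st.2.2.insert p.1 p.2)) (d1, d2, d3)
    = (⟨d1.items ++ l.filter (fun p => pvLevel p.2 == 0)⟩,
       ⟨d2.items ++ l.filter (fun p => pvLevel p.2 == 1)⟩,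
       ⟨d3.items ++ l.filter (fun p => pvLevel p.2 == 2)⟩) := by
  induction l generalizing d1 d2 d3 with
  | nil => simp
  | cons p t ih =>
    simp only [List.map_cons, List.nodup_cons, List.mem_map] at hnd
    have hfresh : ∀ (d : PySem.Dict String Int),
        (∀ q ∈ p :: t, d.contains q.1 = false) → ∀ q ∈ t, (d.insert p.1 p.2).contains q.1 = false := by
      intro d hd q hq
      rw [PySem.Dict.contains_insert]
      have hne : q.1 ≠ p.1 := fun h => hnd.1 ⟨q, hq, h⟩
      simp [hne, hd q (List.mem_cons_of_mem _ hq)]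
    have hins : ∀ (d : PySem.Dict String Int),
        (∀ q ∈ p :: t, d.contains q.1 = false) → (d.insert p.1 p.2).items = d.items ++ [p] := by
      intro d hd
      simp [PySem.Dict.items_insert, hd p (List.mem_cons_self)]
    simp only [List.foldl_cons, List.filter_cons]
    by_cases hc1 : p.2 < 10000000
    · have hlv : pvLevel p.2 = 0 := by simp [pvLevel, hc1]
      rw [if_pos hc1, ih _ _ _ hnd.2 (hfresh d1 h1)
        (fun q hq => h2 q (List.mem_cons_of_mem _ hq))
        (fun q hq => h3 q (List.mem_cons_of_mem _ hq)),
        hins d1 h1]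
      simp [hlv]
    · rw [if_neg hc1]
      by_cases hc2 : p.2 < 1000000000
      · have hlv : pvLevel p.2 = 1 := by simp [pvLevel, hc1, hc2]
        rw [if_pos hc2, ih _ _ _ hnd.2 (fun q hq => h1 q (List.mem_cons_of_mem _ hq))
          (hfresh d2 h2) (fun q hq => h3 q (List.mem_cons_of_mem _ hq)),
          hins d2 h2]
        simp [hlv]
      · have hlv : pvLevel p.2 = 2 := by simp [pvLevel, hc1, hc2]
        rw [if_neg hc2, ih _ _ _ hnd.2 (fun q hq => h1 q (List.mem_cons_of_mem _ hq))
          (fun q hq => h2 q (List.mem_cons_of_mem _ hq)) (hfresh d3 h3),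
          hins d3 h3]
        simp [hlv]

-- ===== VERDICT (by name: the statement is the Claim_ definition above) =====
theorem group_countries_spec : Claim_equal_group_countries := by
  intro l _ hpre
  unfold Spec_group_countries group_countries group_countries_alt
  set f0 := l.filter (fun p => pvLevel p.2 == 0) with hf0
  set f1 := l.filter (fun p => pvLevel p.2 == 1) with hf1
  set f2 := l.filter (fun p => pvLevel p.2 == 2) with hf2
  have hmem0 : ∀ x ∈ f0, pvLevel x.2 = 0 := by
    intro x hx; rw [hf0] at hx; simpa using (List.of_mem_filter hx)
  have hmem1 : ∀ x ∈ f1, pvLevel x.2 = 1 := by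
    intro x hx; rw [hf1] at hx; simpa using (List.of_mem_filter hx)
  have hmem2 : ∀ x ∈ f2, pvLevel x.2 = 2 := by
    intro x hx; rw [hf2] at hx; simpa using (List.of_mem_filter hx)
  have hsort : PySem.List.sorted l (fun kv => pvLevel kv.2) = f0 ++ f1 ++ f2 := by
    rw [sorted_level_eq l, hf0, hf1, hf2]
  have hi : pvScan (f0 ++ f1 ++ f2) 0 = f0.length := by
    rw [List.append_assoc]
    exact pvScan_append f0 (f1 ++ f2) 0 hmem0 (fun x hx => by
      rcases List.mem_append.mp hx with hx | hx
      · rw [hmem1 x hx]; decide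
      · rw [hmem2 x hx]; decide)
  have hdropi : (f0 ++ f1 ++ f2).drop f0.length = f1 ++ f2 := by
    rw [List.append_assoc]; exact List.drop_left
  have hj : pvScan (f1 ++ f2) 1 = f1.length :=
    pvScan_append f1 f2 1 hmem1 (fun x hx => by rw [hmem2 x hx]; decide)
  have hnd : ∀ (p : String × Int → Bool), ((l.filter p).map Prod.fst).Nodup := fun p =>
    List.Nodup.sublist (List.Sublist.map Prod.fst List.filter_sublist) hpre
  simp only [hsort, hi, hdropi, hj]
  rw [group_countries_loop_eq l PySem.Dict.empty PySem.Dict.empty PySem.Dict.empty hpre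
    (fun q _ => PySem.Dict.contains_empty q.1)
    (fun q _ => PySem.Dict.contains_empty q.1)
    (fun q _ => PySem.Dict.contains_empty q.1)]
  rw [PySem.List.slice_to_natCast, PySem.List.slice_natCast, PySem.List.slice_from_natCast]
  rw [List.append_assoc f0 f1 f2, List.take_left, List.drop_left]
  have htake1 : (f1 ++ f2).take (f0.length + f1.length - f0.length) = f1 := by
    simp
  have hdropj : (f0 ++ (f1 ++ f2)).drop (f0.length + f1.length) = f2 := by
    rw [← List.append_assoc, show f0.length + f1.length = (f0 ++ f1).length by simp,
      List.drop_left]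
  rw [htake1, hdropj, ofList_items f0 (hnd _), ofList_items f1 (hnd _), ofList_items f2 (hnd _)]
  simp [PySem.Dict.empty, ← hf0, ← hf1, ← hf2]
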